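-- pv_equiv track=rewrite | github.com/Quantum-Interns-at-Qualcomm-Institiute/quantum-nonogram-solver | nonogram/core.py | grid_to_clues
-- ===== SOURCE A (Python) =====
-- def rle(bits: list[bool]) -> tuple[int, ...]:
--     """Run-length encode boolean sequence, returning lengths of contiguous True runs.
--
--     This is the inverse operation of the lookup table generation in ``nonogram.data``.
--     It converts a binary row/column state to the nonogram clue format (space-separated
--     block lengths).
--
--     Parameters
--     ----------
--     bits : list[bool]
--         Boolean sequence representing filled (True) and empty (False) cells.
--
--     Returns
--     -------
--     tuple[int, ...]
--         Lengths of contiguous True groups, in order. Returns (0,) if all bits are False.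
--
--     Example
--     -------
--     >>> rle([True, False, True, True])
--     (1, 2)
--     >>> rle([False, False, False])
--     (0,)
--     >>> rle([True, True, True])
--     (3,)
--     """
--     groups: list[int] = []
--     count = 0
--     for b in bits:
--         if b:
--             count += 1
--         elif count:
--             groups.append(count)
--             count = 0
--     if count:
--         groups.append(count)
--     return tuple(groups) if groups else (0,)
--
-- def grid_to_clues(
--     grid: list[list[bool]],
-- ) -> tuple[list[tuple[int, ...]], list[tuple[int, ...]]]:
--     """Compute row and column clues from a filled-cell grid.
--
--     This function is the inverse of the solver: given a completed grid, it extracts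
--     the nonogram clues (block lengths) for each row and column. Useful for
--     exporting user-drawn puzzles or validating solved grids.
--
--     Parameters
--     ----------
--     grid : list[list[bool]]
--         2D grid where True = filled cell, False = empty cell.
--         Shape: (rows, cols).
--
--     Returns
--     -------
--     tuple[list[tuple[int, ...]], list[tuple[int, ...]]]
--         ``(row_clues, col_clues)`` where each clue is a tuple of contiguous
--         block lengths (run-length encoded via :func:`rle`).
--
--     Example
--     -------
--     >>> grid = [[True, False, True], [False, True, True]]
--     >>> row_clues, col_clues = grid_to_clues(grid)
--     >>> row_clues
--     [(1, 1), (2,)]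
--     >>> col_clues
--     [(1,), (1, 1), (1,)]
--     """
--     rows = len(grid)
--     cols = len(grid[0]) if rows else 0
--     row_clues = [rle(grid[r]) for r in range(rows)]
--     col_clues = [rle([grid[r][c] for r in range(rows)]) for c in range(cols)]
--     return row_clues, col_clues
-- ===== SOURCE B (Python) =====
-- def rle(bits):
--     runs = []
--     i, n = 0, len(bits)
--     while i < n:
--         j = i
--         while j < n and bits[j] == bits[i]:
--             j += 1
--         if bits[i]:
--             runs.append(j - i)
--         i = j
--     return tuple(runs) or (0,)
--
--
-- def grid_to_clues(grid):
--     row_clues = [rle(row) for row in grid]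
--     col_clues = [rle(col) for col in zip(*grid)]
--     return row_clues, col_clues
-- ===== Notes on version B (the rewrite author's own statement) =====
-- stated objective: idiomatic
-- what changed: rle now splits the sequence into maximal runs of equal bits (span-based grouping, as itertools.groupby would) instead of maintaining a running counter with flushes, and the column clues are computed by transposing the grid with zip(*grid) and mapping rle over the columns instead of A's nested index comprehension grid[r][c].
import Mathlib
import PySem

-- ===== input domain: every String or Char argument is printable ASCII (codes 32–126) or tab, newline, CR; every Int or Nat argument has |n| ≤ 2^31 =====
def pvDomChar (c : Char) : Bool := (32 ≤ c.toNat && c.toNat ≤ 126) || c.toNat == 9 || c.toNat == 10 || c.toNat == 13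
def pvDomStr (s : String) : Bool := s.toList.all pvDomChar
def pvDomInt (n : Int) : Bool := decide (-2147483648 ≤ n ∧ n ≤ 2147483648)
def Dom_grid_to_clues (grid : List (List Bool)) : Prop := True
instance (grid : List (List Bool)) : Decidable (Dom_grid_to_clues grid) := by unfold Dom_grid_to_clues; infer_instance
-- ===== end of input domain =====

-- B groups each sequence into maximal runs first (span-based grouping) and transposes
-- the grid with zip(*grid) instead of A's running counter and nested index loops; objective: idiomatic.

-- ===== PORT A =====
-- rle: running counter over the bits, flushing the count at each False and at the end
def rleA (bits : List Bool) : List Int :=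
  let s := bits.foldl
    (fun (s : List Int × Int) b =>
      if b then (s.1, s.2 + 1)
      else if s.2 ≠ 0 then (s.1 ++ [s.2], (0 : Int)) else s)
    ([], 0)
  let groups := if s.2 ≠ 0 then s.1 ++ [s.2] else s.1
  if groups = [] then [(0 : Int)] else groups

def grid_to_clues (grid : List (List Bool)) : List (List Int) × List (List Int) :=
  let rows : Int := grid.length
  let cols : Int := if rows ≠ 0 then ((grid.headD []).length : Int) else 0
  let row_clues := (PySem.List.pyRange 0 rows 1).map
    (fun r => rleA (PySem.List.pyGetD grid r []))
  let col_clues := (PySem.List.pyRange 0 cols 1).map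
    (fun c => rleA ((PySem.List.pyRange 0 rows 1).map
      (fun r => PySem.List.pyGetD (PySem.List.pyGetD grid r []) c false)))
  (row_clues, col_clues)

-- ===== PORT B =====
-- rle in B: split the sequence into maximal runs of equal bits, keep the True runs' lengths
def rleB_runs : List Bool → List Int
  | [] => []
  | x :: t =>
    (if x then [((t.takeWhile (· == x)).length + 1 : Int)] else [])
      ++ rleB_runs (t.dropWhile (· == x))
termination_by l => l.length
decreasing_by
  have := List.length_dropWhile_le (· == x) t
  simp; omega

def rleB (bits : List Bool) : List Int :=
  let runs := rleB_runs bits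
  if runs = [] then [(0 : Int)] else runs

-- zip(*grid): transpose truncated to the shortest row
def pyZipStar (ls : List (List Bool)) : List (List Bool) :=
  if ls.isEmpty || ls.any (·.isEmpty) then []
  else (ls.map (fun r => r.headD false)) :: pyZipStar (ls.map (fun r => r.tail))
termination_by (ls.headD []).length
decreasing_by
  rename_i h
  simp only [Bool.or_eq_true, List.isEmpty_iff, List.any_eq_true, not_or, not_exists, not_and] at h
  obtain ⟨h1, h2⟩ := h
  cases ls with
  | nil => exact absurd rfl h1
  | cons r t =>
    have hr := h2 r List.mem_cons_self
    cases r with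
    | nil => simp at hr
    | cons a r' => simp

def grid_to_clues_alt (grid : List (List Bool)) : List (List Int) × List (List Int) :=
  (grid.map rleB, (pyZipStar grid).map rleB)

-- ===== PRECONDITION & SPEC =====
-- Pre_ excludes exactly the ragged grids in which some row is SHORTER than row 0:
-- there A's grid[r][c] raises IndexError (no value is returned).
def Pre_grid_to_clues (grid : List (List Bool)) : Prop :=
  ∀ row ∈ grid, (grid.headD []).length ≤ row.length

instance (grid : List (List Bool)) : Decidable (Pre_grid_to_clues grid) := by
  unfold Pre_grid_to_clues; infer_instance

def pvWitness_grid_to_clues : List (List Bool) := [[true, false, true], [false, true, true]]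

def Spec_grid_to_clues (grid : List (List Bool)) (out : List (List Int) × List (List Int)) : Prop := out = grid_to_clues_alt grid
instance (grid : List (List Bool)) (out : List (List Int) × List (List Int)) : Decidable (Spec_grid_to_clues grid out) := by unfold Spec_grid_to_clues; infer_instance

-- ===== CLAIM (what is proved, stated in full; the proofs are below) =====
def Claim_equal_grid_to_clues : Prop := ∀ (grid : List (List Bool)), Dom_grid_to_clues grid → Pre_grid_to_clues grid → Spec_grid_to_clues grid (grid_to_clues grid)

-- ===== LEMMAS AND PROOFS =====

-- canonical "lengths of the maximal True runs", with c the count of Trues already seen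
def pvRun : List Bool → Int → List Int
  | [], c => if c ≠ 0 then [c] else []
  | true :: t, c => pvRun t (c + 1)
  | false :: t, c => (if c ≠ 0 then [c] else []) ++ pvRun t 0

lemma rleA_fold (bits : List Bool) : ∀ (g : List Int) (c : Int),
    (let s := bits.foldl
      (fun (s : List Int × Int) b =>
        if b then (s.1, s.2 + 1)
        else if s.2 ≠ 0 then (s.1 ++ [s.2], (0 : Int)) else s)
      (g, c)
     if s.2 ≠ 0 then s.1 ++ [s.2] else s.1) = g ++ pvRun bits c := by
  induction bits with
  | nil => intro g c; by_cases h : c = 0 <;> simp [pvRun, h]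
  | cons b t ih =>
    intro g c
    cases b with
    | true => simpa [pvRun] using ih g (c + 1)
    | false =>
      by_cases h : c = 0
      · simpa [pvRun, h] using ih g 0
      · simpa [pvRun, h] using ih (g ++ [c]) 0

lemma rleA_eq_run (bits : List Bool) :
    rleA bits = if pvRun bits 0 = [] then [(0 : Int)] else pvRun bits 0 := by
  have h := rleA_fold bits [] 0
  simp only [rleA]
  rw [h]
  simp

lemma pvRun_true_prefix : ∀ (tk t : List Bool), (∀ x ∈ tk, x = true) →
    ∀ c, pvRun (tk ++ t) c = pvRun t (c + tk.length) := by
  intro tk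
  induction tk with
  | nil => intro t _ c; simp
  | cons x tk ih =>
    intro t h c
    have hx : x = true := h x List.mem_cons_self
    subst hx
    simp only [List.cons_append, pvRun, ih t (fun y hy => h y (List.mem_cons_of_mem _ hy)) (c + 1)]
    congr 1
    simp only [List.length_cons]
    push_cast
    omega

lemma pvRun_false_prefix : ∀ (tk t : List Bool), (∀ x ∈ tk, x = false) →
    pvRun (tk ++ t) 0 = pvRun t 0 := by
  intro tk
  induction tk with
  | nil => intro t _; simp
  | cons x tk ih =>
    intro t h
    have hx : x = false := h x List.mem_cons_self
    subst hx
    simpa [pvRun] using ih t (fun y hy => h y (List.mem_cons_of_mem _ hy))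

lemma pvRun_flush (dr : List Bool) (c : Int) (hc : c ≠ 0)
    (hd : dr.head? ≠ some true) : pvRun dr c = c :: pvRun dr 0 := by
  cases dr with
  | nil => simp [pvRun, hc]
  | cons x t =>
    cases x with
    | true => simp at hd
    | false => simp [pvRun, hc]

lemma rleB_runs_eq_run (bits : List Bool) : rleB_runs bits = pvRun bits 0 := by
  induction bits using rleB_runs.induct with
  | case1 => simp [rleB_runs, pvRun]
  | case2 x t ih =>
    rw [rleB_runs]
    have hsplit : t.takeWhile (· == x) ++ t.dropWhile (· == x) = t :=
      List.takeWhile_append_dropWhile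
    have hhd : (t.dropWhile (· == x)).head? ≠ some x := by
      intro hcon
      have := List.head?_dropWhile_not (· == x) t
      rw [hcon] at this
      simp at this
    cases x with
    | true =>
      have hall : ∀ y ∈ t.takeWhile (· == true), y = true := by
        intro y hy
        have := List.mem_takeWhile_imp hy
        simpa using this
      have h2 := pvRun_true_prefix (t.takeWhile (· == true)) (t.dropWhile (· == true)) hall 1
      rw [hsplit] at h2
      have h1 : pvRun (true :: t) 0 = pvRun t 1 := by simp [pvRun]
      have hc : (1 : Int) + (t.takeWhile (· == true)).length ≠ 0 := by positivity
      rw [h1, h2, pvRun_flush _ _ hc hhd, ih]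
      simp
      omega
    | false =>
      have hall : ∀ y ∈ t.takeWhile (· == false), y = false := by
        intro y hy
        have := List.mem_takeWhile_imp hy
        simpa using this
      have h2 := pvRun_false_prefix (t.takeWhile (· == false)) (t.dropWhile (· == false)) hall
      rw [hsplit] at h2
      have h1 : pvRun (false :: t) 0 = pvRun t 0 := by simp [pvRun]
      rw [h1, h2, ih]
      simp

lemma rle_eq (bits : List Bool) : rleA bits = rleB bits := by
  rw [rleA_eq_run, rleB, rleB_runs_eq_run]

lemma getD_zero_eq_headD (row : List Bool) : row.getD 0 false = row.headD false := by
  cases row <;> rfl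

lemma getD_succ_eq_tail_getD (row : List Bool) (c : Nat) :
    row.getD (c + 1) false = row.tail.getD c false := by
  cases row <;> rfl

lemma pyZipStar_eq_cols : ∀ (n : Nat) (ls : List (List Bool)), ls ≠ [] →
    (ls.headD []).length = n → (∀ row ∈ ls, n ≤ row.length) →
    pyZipStar ls = (List.range n).map (fun c => ls.map (fun row => row.getD c false)) := by
  intro n
  induction n with
  | zero =>
    intro ls hne hhd _
    cases ls with
    | nil => exact absurd rfl hne
    | cons r t =>
      have hr : r = [] := by simpa using List.length_eq_zero_iff.mp (by simpa using hhd)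
      rw [pyZipStar]
      simp [hr]
  | succ n ih =>
    intro ls hne hhd hall
    have hno : ¬ (ls.isEmpty || ls.any (·.isEmpty)) = true := by
      simp only [Bool.or_eq_true, List.isEmpty_iff, List.any_eq_true, not_or, not_exists]
      refine ⟨hne, ?_⟩
      intro r
      intro hcontra
      obtain ⟨hmem, hemp⟩ := hcontra
      have := hall r hmem
      have hre : r = [] := hemp
      rw [hre] at this
      simp at this
    rw [pyZipStar, if_neg hno]
    have hmt : ls.map (fun r => r.tail) ≠ [] := by
      intro hc; exact hne (List.map_eq_nil_iff.mp hc)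
    have hhd' : ((ls.map (fun r => r.tail)).headD []).length = n := by
      cases ls with
      | nil => exact absurd rfl hne
      | cons r t =>
        simp only [List.map_cons, List.headD_cons] at hhd ⊢
        simp [List.length_tail]
        omega
    have hall' : ∀ row ∈ ls.map (fun r => r.tail), n ≤ row.length := by
      intro row hrow
      obtain ⟨r, hr, rfl⟩ := List.mem_map.mp hrow
      have := hall r hr
      simp [List.length_tail]
      omega
    rw [ih _ hmt hhd' hall']
    rw [List.range_succ_eq_map]
    simp only [List.map_cons, List.map_map]
    congr 1
    · apply List.map_congr_left
      intro r _
      exact (getD_zero_eq_headD r).symm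
    · apply List.map_congr_left
      intro c _
      apply List.map_congr_left
      intro r _
      simp only [Function.comp_apply]
      exact (getD_succ_eq_tail_getD r c).symm

lemma inner_col (grid : List (List Bool)) (c : Int) :
    (PySem.List.pyRange 0 (grid.length : Int) 1).map
      (fun r => PySem.List.pyGetD (PySem.List.pyGetD grid r []) c false)
    = grid.map (fun row => PySem.List.pyGetD row c false) := by
  have h : (PySem.List.pyRange 0 (grid.length : Int) 1).map
      (fun r => PySem.List.pyGetD (PySem.List.pyGetD grid r []) c false)
    = ((PySem.List.pyRange 0 (grid.length : Int) 1).map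
        (fun r => PySem.List.pyGetD grid r [])).map (fun row => PySem.List.pyGetD row c false) := by
    rw [List.map_map]; rfl
  rw [h, PySem.List.map_pyGetD_pyRange_zero']

lemma row_clues_eq (grid : List (List Bool)) :
    (PySem.List.pyRange 0 (grid.length : Int) 1).map
      (fun r => rleA (PySem.List.pyGetD grid r []))
    = grid.map rleB := by
  have h : (PySem.List.pyRange 0 (grid.length : Int) 1).map
      (fun r => rleA (PySem.List.pyGetD grid r []))
    = ((PySem.List.pyRange 0 (grid.length : Int) 1).map
        (fun r => PySem.List.pyGetD grid r [])).map rleA := by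
    rw [List.map_map]; rfl
  rw [h, PySem.List.map_pyGetD_pyRange_zero']
  apply List.map_congr_left
  intro row _
  exact rle_eq row

-- ===== VERDICT (by name: the statement is the Claim_ definition above) =====
theorem grid_to_clues_spec : Claim_equal_grid_to_clues := by
  unfold Claim_equal_grid_to_clues
  intro grid _ hpre
  unfold Spec_grid_to_clues
  cases grid with
  | nil =>
    simp [grid_to_clues, grid_to_clues_alt, pyZipStar]
  | cons r0 t =>
    set grid := r0 :: t with hgrid
    have hne : grid ≠ [] := by simp [hgrid]
    have hlen : (grid.length : Int) ≠ 0 := by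
      rw [hgrid]; simp only [List.length_cons]; push_cast; omega
    unfold grid_to_clues grid_to_clues_alt
    simp only [hlen, if_pos, ne_eq, not_false_eq_true]
    refine Prod.ext ?_ ?_
    · simpa using row_clues_eq grid
    · -- columns
      have hcols := pyZipStar_eq_cols (grid.headD []).length grid hne rfl
        (by intro row hrow; exact hpre row hrow)
      simp only
      rw [hcols]
      simp only [inner_col]
      rw [PySem.List.pyRange_one]
      simp only [sub_zero, Int.toNat_natCast, List.map_map]
      apply List.map_congr_left
      intro k hk
      simp only [Function.comp_apply]
      rw [rle_eq]
      congr 1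
      apply List.map_congr_left
      intro row _
      have h0 : (0 : Int) + (k : Int) = ((k : Nat) : Int) := by ring
      rw [h0, PySem.List.pyGetD_natCast]
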